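-- pv_equiv track=rewrite | github.com/mohith-sakthivel/deep_hand-eye_calib | mvs_dataset.py | _create_word_list
-- ===== SOURCE A (Python) =====
-- def _create_word_list(sentences):
--     """
--     Turn a list of sentences into a list of processed words (no punctuation, lowercase, etc)
--     Args:
--         sentences: a list of str, sentences to be splitted into words
--     Return:
--         A list of str, words from the split, order remained.
--     """
--
--     ############ 1.4 TODO
--     word_list = []
--     for sentence in sentences:
--         sentence = sentence.lower()
--         sentence = ''.join([i for i in sentence if (i.isalpha() or i == ' ')])
--         words = sentence.split()
--         for word in words:
--             word_list.append(word)
--     return word_list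
-- ===== SOURCE B (Python) =====
-- def _create_word_list(sentences):
--     """Single-pass scanner: no cleaned intermediate string, no split()."""
--     word_list = []
--     for sentence in sentences:
--         buf = ""
--         for ch in sentence.lower():
--             if ch.isalpha():
--                 buf += ch
--             elif ch == ' ':
--                 if buf:
--                     word_list.append(buf)
--                     buf = ""
--             # any other character is skipped (A removes it before splitting)
--         if buf:
--             word_list.append(buf)
--     return word_list
-- ===== Notes on version B (the rewrite author's own statement) =====
-- stated objective: alternative
-- what changed: Replaces A's per-sentence pipeline (build a filtered string, then split() it) with a single character scan maintaining a word buffer that is flushed on spaces and at sentence end.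
import Mathlib
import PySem

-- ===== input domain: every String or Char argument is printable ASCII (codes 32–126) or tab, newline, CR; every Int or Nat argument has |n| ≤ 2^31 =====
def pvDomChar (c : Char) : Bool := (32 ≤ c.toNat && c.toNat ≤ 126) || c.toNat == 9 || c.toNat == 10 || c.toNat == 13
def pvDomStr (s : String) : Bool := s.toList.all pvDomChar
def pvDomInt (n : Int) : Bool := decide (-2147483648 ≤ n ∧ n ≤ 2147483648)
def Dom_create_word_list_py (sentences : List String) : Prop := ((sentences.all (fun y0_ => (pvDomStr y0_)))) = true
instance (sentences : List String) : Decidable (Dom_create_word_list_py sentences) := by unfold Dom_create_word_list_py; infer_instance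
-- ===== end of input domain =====

-- B replaces A's build-a-cleaned-string-then-split() pipeline with a one-pass scan keeping a word buffer (alternative decomposition, same cost).

-- ===== PORT A =====
def create_word_list_py (sentences : List String) : List String :=
  sentences.foldl (fun word_list sentence =>
    -- sentence = sentence.lower()
    let s1 := PySem.Chars.lower sentence.toList
    -- sentence = ''.join([i for i in sentence if (i.isalpha() or i == ' ')])
    let s2 := s1.filter (fun i => PySem.Chars.isalpha i || i == ' ')
    -- words = sentence.split()
    let words := (PySem.Chars.split₀ s2).map String.mk
    -- for word in words: word_list.append(word)
    words.foldl (fun wl w => wl ++ [w]) word_list) []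

-- ===== PORT B =====
-- one character of B's inner loop: extend the buffer on a letter, flush it on ' ', skip anything else
def pvStep (st : List String × List Char) (c : Char) : List String × List Char :=
  if PySem.Chars.isalpha c then (st.1, st.2 ++ [c])
  else if c == ' ' then (if st.2.isEmpty then st else (st.1 ++ [String.mk st.2], []))
  else st

def create_word_list_py_alt (sentences : List String) : List String :=
  sentences.foldl (fun acc s =>
    let r := (PySem.Chars.lower s.toList).foldl pvStep (acc, [])
    if r.2.isEmpty then r.1 else r.1 ++ [String.mk r.2]) []

-- ===== PRECONDITION & SPEC =====
def Spec_create_word_list_py (sentences : List String) (out : List String) : Prop := out = create_word_list_py_alt sentences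
instance (sentences : List String) (out : List String) : Decidable (Spec_create_word_list_py sentences out) := by unfold Spec_create_word_list_py; infer_instance

-- ===== CLAIM (what is proved, stated in full; the proofs are below) =====
def Claim_equal_create_word_list_py : Prop := ∀ (sentences : List String), Dom_create_word_list_py sentences → Spec_create_word_list_py sentences (create_word_list_py sentences)

-- ===== LEMMAS AND PROOFS =====

theorem pv_isalpha_not_isspace (c : Char) (h : PySem.Chars.isalpha c = true) :
    PySem.Chars.isspace c = false := by
  simp [PySem.Chars.isalpha, PySem.Chars.isupper, PySem.Chars.islower, Char.le_def] at h
  simp only [PySem.Chars.isspace]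
  have h65 : 65 ≤ c.toNat ∧ c.toNat ≤ 90 ∨ 97 ≤ c.toNat ∧ c.toNat ≤ 122 := by
    rcases h with ⟨h1, h2⟩ | ⟨h1, h2⟩ <;>
      [left; right] <;> exact ⟨UInt32.le_iff_toNat_le.mp h1, UInt32.le_iff_toNat_le.mp h2⟩
  simp only [Bool.or_eq_false_iff, Bool.and_eq_false_iff, decide_eq_false_iff_not]
  omega

-- split₀.go's accumulator is just prepended (reversed) to the result
theorem pv_go_acc (cs : List Char) : ∀ (cur : List Char) (acc : List (List Char)),
    PySem.Chars.split₀.go cs cur acc = acc.reverse ++ PySem.Chars.split₀.go cs cur [] := by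
  induction cs with
  | nil =>
    intro cur acc
    simp [PySem.Chars.split₀.go]
    split_ifs <;> simp
  | cons c rest ih =>
    intro cur acc
    simp only [PySem.Chars.split₀.go]
    split_ifs with h1 h2
    · exact ih [] acc
    · rw [ih [] (cur.reverse :: acc), ih [] [cur.reverse]]
      simp
    · exact ih (c :: cur) acc

-- B's inner scan over cs equals appending the words of split₀ of the kept characters of cs
theorem pv_inner (cs : List Char) : ∀ (ws : List String) (buf : List Char),
    (let r := cs.foldl pvStep (ws, buf);
     if r.2.isEmpty then r.1 else r.1 ++ [String.mk r.2])
    = ws ++ (PySem.Chars.split₀.go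
        (cs.filter (fun i => PySem.Chars.isalpha i || i == ' ')) buf.reverse []).map String.mk := by
  induction cs with
  | nil =>
    intro ws buf
    simp only [List.foldl_nil, List.filter_nil, PySem.Chars.split₀.go]
    by_cases hb : buf = []
    · subst hb; simp
    · have h1 : buf.isEmpty = false := by simpa using hb
      have h2 : buf.reverse.isEmpty = false := by simpa using hb
      simp [h1, h2]
  | cons c rest ih =>
    intro ws buf
    by_cases ha : PySem.Chars.isalpha c = true
    · have hsp := pv_isalpha_not_isspace c ha
      simp only [List.foldl_cons, List.filter_cons, ha, Bool.true_or, if_pos,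
        PySem.Chars.split₀.go, hsp, Bool.false_eq_true, if_false, pvStep]
      rw [ih ws (buf ++ [c])]
      simp
    · by_cases hsp : c = ' '
      · subst hsp
        have hspace : PySem.Chars.isspace ' ' = true := by decide
        simp only [List.foldl_cons, List.filter_cons, ha, pvStep, Bool.false_eq_true, if_false,
          beq_self_eq_true, if_pos, Bool.false_or, hspace, PySem.Chars.split₀.go]
        by_cases hb : buf.isEmpty
        · have : buf = [] := by simpa [List.isEmpty_iff] using hb
          subst this
          simp only [hb, if_pos]
          rw [ih ws []]
          simp
        · simp only [hb, Bool.false_eq_true, if_false]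
          have hbr : buf.reverse.isEmpty = false := by
            cases buf <;> simp_all
          simp only [hbr, Bool.false_eq_true, if_false]
          rw [ih (ws ++ [String.mk buf]) [], pv_go_acc _ [] [buf.reverse.reverse]]
          simp
      · have hne : (c == ' ') = false := by simpa using hsp
        simp only [List.foldl_cons, List.filter_cons, ha, hne, pvStep, Bool.false_eq_true,
          if_false, Bool.false_or]
        exact ih ws buf

-- per sentence, A's update of the accumulator equals B's
theorem pv_sentence (acc : List String) (s : String) :
    ((PySem.Chars.split₀
        ((PySem.Chars.lower s.toList).filter (fun i => PySem.Chars.isalpha i || i == ' '))).map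
      String.mk).foldl (fun wl w => wl ++ [w]) acc
    = (let r := (PySem.Chars.lower s.toList).foldl pvStep (acc, []);
       if r.2.isEmpty then r.1 else r.1 ++ [String.mk r.2]) := by
  rw [pv_inner (PySem.Chars.lower s.toList) acc []]
  rw [PySem.List.foldl_append_singleton]
  simp [PySem.Chars.split₀]

theorem pv_main (sentences : List String) : ∀ (acc : List String),
    sentences.foldl (fun word_list sentence =>
      let s1 := PySem.Chars.lower sentence.toList
      let s2 := s1.filter (fun i => PySem.Chars.isalpha i || i == ' ')
      let words := (PySem.Chars.split₀ s2).map String.mk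
      words.foldl (fun wl w => wl ++ [w]) word_list) acc
    = sentences.foldl (fun acc s =>
      let r := (PySem.Chars.lower s.toList).foldl pvStep (acc, [])
      if r.2.isEmpty then r.1 else r.1 ++ [String.mk r.2]) acc := by
  induction sentences with
  | nil => intro acc; rfl
  | cons s rest ih =>
    intro acc
    simp only [List.foldl_cons]
    rw [pv_sentence acc s]
    exact ih _

-- ===== VERDICT (by name: the statement is the Claim_ definition above) =====
theorem create_word_list_py_spec : Claim_equal_create_word_list_py := by
  intro sentences _
  unfold Spec_create_word_list_py create_word_list_py create_word_list_py_alt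
  exact pv_main sentences []
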